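-- pv_equiv track=rewrite | github.com/lrw-666/study_project | PythonProject/arithmetic_exercise/day4.py | dfs
-- ===== SOURCE A (Python) =====
-- def dfs(G, s, d, f, S=None, t=0):
--     if S is None:
--         S = set()
--         d[s] = t
--         t += 1
--         S.add(s)
--     for u in G[s]:
--         if u in S:
--             continue
--         t = dfs(G, u, d, f, S, t)
--     f[s] = t
--     t += 1
--     return t
-- ===== SOURCE B (Python) =====
-- # Iterative depth-first walk: an explicit stack of (node, neighbor-iterator)
-- # frames replaces the recursion; same return value and the same in-place
-- # writes to d and f.
-- def dfs(G, s, d, f, S=None, t=0):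
--     if S is None:
--         S = set()
--         d[s] = t
--         t += 1
--         S.add(s)
--     stack = [(s, iter(G[s]))]
--     while stack:
--         node, it = stack[-1]
--         u = next(it, None)
--         if u is None:
--             f[node] = t
--             t += 1
--             stack.pop()
--         elif u not in S:
--             stack.append((u, iter(G[u])))
--     return t
-- ===== Notes on version B (the rewrite author's own statement) =====
-- stated objective: alternative
-- what changed: The recursive depth-first walk is rewritten as a single while loop over an explicit stack of (node, neighbour-iterator) frames, with the same neighbour order, t-threading and in-place writes to d and f; Pre_ excludes exactly the inputs on which A raises (KeyError on a visited node missing from G, or unbounded recursion on a reachable cycle not blocked by S).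
import Mathlib
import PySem

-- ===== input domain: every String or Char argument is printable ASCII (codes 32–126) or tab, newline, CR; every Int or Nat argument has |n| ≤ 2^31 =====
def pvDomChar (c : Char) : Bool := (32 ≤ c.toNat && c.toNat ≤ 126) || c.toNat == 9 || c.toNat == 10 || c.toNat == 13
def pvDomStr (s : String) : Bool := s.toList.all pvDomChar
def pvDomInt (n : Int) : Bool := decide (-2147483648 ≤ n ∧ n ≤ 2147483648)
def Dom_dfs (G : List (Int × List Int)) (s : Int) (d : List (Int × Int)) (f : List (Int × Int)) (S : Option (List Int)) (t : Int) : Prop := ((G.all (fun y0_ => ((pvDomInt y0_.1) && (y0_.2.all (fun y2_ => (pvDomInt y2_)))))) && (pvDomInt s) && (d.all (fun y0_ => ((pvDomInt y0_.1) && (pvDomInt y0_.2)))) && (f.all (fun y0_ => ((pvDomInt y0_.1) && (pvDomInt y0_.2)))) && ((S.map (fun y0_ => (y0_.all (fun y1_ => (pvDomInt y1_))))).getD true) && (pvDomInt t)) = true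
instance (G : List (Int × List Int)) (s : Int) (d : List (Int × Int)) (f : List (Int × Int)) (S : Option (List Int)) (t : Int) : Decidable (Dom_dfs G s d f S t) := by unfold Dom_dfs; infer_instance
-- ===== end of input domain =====

-- B replaces the recursion by an iterative loop over an explicit stack of
-- (node, remaining-neighbours) frames: a different decomposition of the same
-- depth-first walk.  A and B perform the same in-place writes to d and f;
-- the equivalence proved below is about the RETURN value.

-- ===== PORT A =====
-- G[u] (dict lookup, first match); none = KeyError
def gget (G : List (Int × List Int)) (u : Int) : Option (List Int) :=
  (PySem.Dict.mk G).get? u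

-- the recursive body of A; the fuel argument only makes the recursion total
-- (it never runs out on an input admitted by Pre_)
def dfsF (G : List (Int × List Int)) (Sv : List Int) : Nat → Int → Int → Int
  | 0, _, t => t
  | fuel+1, s, t =>
    match gget G s with
    | none => t                       -- KeyError, excluded by Pre_
    | some ns =>
      let t := ns.foldl (fun t u => if u ∈ Sv then t else dfsF G Sv fuel u t) t
      t + 1

def dfs (G : List (Int × List Int)) (s : Int) (d : List (Int × Int)) (f : List (Int × Int)) (S : Option (List Int)) (t : Int) : Int :=
  match S with
  | none => dfsF G (PySem.Set.add PySem.Set.empty s) (G.length + 3) s (t + 1)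
  | some Sv => dfsF G Sv (G.length + 3) s t

-- ===== PORT B =====
-- total length of the stack frames (termination measure of the loop)
def stackW : List (Int × List Int) → Nat
  | [] => 0
  | p :: fs => p.2.length + 1 + stackW fs

-- the while loop of Source B: the stack holds (node, remaining neighbours) frames;
-- fuel is spent only when a new frame is pushed and only makes the loop total
-- (it never runs out on an input admitted by Pre_)
def runM (G : List (Int × List Int)) (Sv : List Int) : Nat → List (Int × List Int) → Int → Int
  | _, [], t => t
  | fuel, (_, []) :: fs, t => runM G Sv fuel fs (t + 1)
  | fuel, (node, v :: rest) :: fs, t =>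
    if v ∈ Sv then runM G Sv fuel ((node, rest) :: fs) t
    else
      match gget G v with
      | none => t                     -- KeyError, excluded by Pre_
      | some cs =>
        match fuel with
        | 0 => t
        | fuel' + 1 => runM G Sv fuel' ((v, cs) :: (node, rest) :: fs) t
termination_by fuel stack t => (fuel, stackW stack)
decreasing_by
  all_goals first
    | exact Prod.Lex.left _ _ (by omega)
    | exact Prod.Lex.right _ (by simp [stackW]; try omega)

def dfs_alt (G : List (Int × List Int)) (s : Int) (d : List (Int × Int)) (f : List (Int × Int)) (S : Option (List Int)) (t : Int) : Int :=
  let fuelB := ((G.flatMap Prod.snd).length + 1) ^ (G.length + 3)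
  match S with
  | none =>
    match gget G s with
    | none => t + 1                   -- KeyError, excluded by Pre_
    | some ns => runM G (PySem.Set.add PySem.Set.empty s) fuelB [(s, ns)] (t + 1)
  | some Sv =>
    match gget G s with
    | none => t                       -- KeyError, excluded by Pre_
    | some ns => runM G Sv fuelB [(s, ns)] t

-- ===== PRECONDITION & SPEC =====
-- the blocked set the loop actually runs with ({s} at the root call, else the given S)
def avoidOf (s : Int) (S : Option (List Int)) : List Int :=
  match S with
  | none => [s]
  | some Sv => Sv

-- fuel-capped longest blocked-free path length: a rank on nodes
def depthF (G : List (Int × List Int)) (Sv : List Int) : Nat → Int → Nat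
  | 0, _ => 0
  | k+1, u => ((gget G u).getD []).foldl
      (fun m v => if v ∈ Sv then m else max m (depthF G Sv k v + 1)) 0

-- one expansion step of the visited set: add the non-blocked neighbours of members
def stepR (G : List (Int × List Int)) (Sv : List Int) (R : List Int) : List Int :=
  R ++ R.flatMap (fun u => ((gget G u).getD []).filter (fun v => decide (v ∉ Sv)))

def iterR (G : List (Int × List Int)) (Sv : List Int) (s : Int) : Nat → List Int
  | 0 => [s]
  | k + 1 => stepR G Sv (iterR G Sv s k)

-- the nodes the walk visits: s and everything reachable from it along non-blocked nodes
def reachL (G : List (Int × List Int)) (Sv : List Int) (s : Int) : List Int :=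
  iterR G Sv s (G.length + 2)

-- Pre_ excludes exactly the inputs on which A raises: a KeyError (a visited node
-- missing from G) or unbounded recursion (a reachable cycle not blocked by S);
-- it asks every visited node to be a key of G and the longest-path rank to drop
-- strictly along every followed edge.
def Pre_dfs (G : List (Int × List Int)) (s : Int) (d : List (Int × Int)) (f : List (Int × Int)) (S : Option (List Int)) (t : Int) : Prop :=
  ∀ u ∈ reachL G (avoidOf s S) s,
    (gget G u).isSome = true ∧
    ∀ v ∈ (gget G u).getD [], v ∉ avoidOf s S →
      depthF G (avoidOf s S) (G.length + 2) v < depthF G (avoidOf s S) (G.length + 2) u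

instance (G : List (Int × List Int)) (s : Int) (d : List (Int × Int)) (f : List (Int × Int)) (S : Option (List Int)) (t : Int) : Decidable (Pre_dfs G s d f S t) := by
  unfold Pre_dfs; infer_instance

def pvWitness_dfs : (List (Int × List Int)) × Int × (List (Int × Int)) × (List (Int × Int)) × Option (List Int) × Int :=
  ([(0, [1, 2]), (1, [2]), (2, [])], 0, [], [], none, 0)

def Spec_dfs (G : List (Int × List Int)) (s : Int) (d : List (Int × Int)) (f : List (Int × Int)) (S : Option (List Int)) (t : Int) (out : Int) : Prop := out = dfs_alt G s d f S t
instance (G : List (Int × List Int)) (s : Int) (d : List (Int × Int)) (f : List (Int × Int)) (S : Option (List Int)) (t : Int) (out : Int) : Decidable (Spec_dfs G s d f S t out) := by unfold Spec_dfs; infer_instance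

-- ===== CLAIM (what is proved, stated in full; the proofs are below) =====
def Claim_equal_dfs : Prop := ∀ (G : List (Int × List Int)) (s : Int) (d : List (Int × Int)) (f : List (Int × Int)) (S : Option (List Int)) (t : Int), Dom_dfs G s d f S t → Pre_dfs G s d f S t → Spec_dfs G s d f S t (dfs G s d f S t)

-- ===== LEMMAS AND PROOFS =====
-- the call-count of A from node u (A returns t plus this count)
def cntN (G : List (Int × List Int)) (Sv : List Int) (u : Int) : Int :=
  dfsF G Sv (depthF G Sv (G.length + 2) u + 1) u 0

-- total pop-count of the frames still to process (fuel the loop needs for them)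
def sumCL (G : List (Int × List Int)) (Sv : List Int) (l : List Int) : Nat :=
  (l.map (fun v => if v ∈ Sv then 0 else (cntN G Sv v).toNat)).sum

-- equation lemmas for the loop
lemma runM_nil (G : List (Int × List Int)) (Sv : List Int) (fuel : Nat) (t : Int) :
    runM G Sv fuel [] t = t := by
  simp [runM]

lemma runM_pop (G : List (Int × List Int)) (Sv : List Int) (fuel : Nat) (u : Int)
    (fs : List (Int × List Int)) (t : Int) :
    runM G Sv fuel ((u, []) :: fs) t = runM G Sv fuel fs (t + 1) := by
  simp [runM]

lemma runM_skip (G : List (Int × List Int)) (Sv : List Int) (fuel : Nat) (u v : Int)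
    (rest : List Int) (fs : List (Int × List Int)) (t : Int) (hb : v ∈ Sv) :
    runM G Sv fuel ((u, v :: rest) :: fs) t = runM G Sv fuel ((u, rest) :: fs) t := by
  rw [runM]; simp [hb]

lemma runM_push (G : List (Int × List Int)) (Sv : List Int) (fuel : Nat) (u v : Int)
    (rest : List Int) (fs : List (Int × List Int)) (t : Int) (cs : List Int)
    (hb : v ∉ Sv) (hg : gget G v = some cs) :
    runM G Sv (fuel + 1) ((u, v :: rest) :: fs) t
      = runM G Sv fuel ((v, cs) :: (u, rest) :: fs) t := by
  rw [runM]; simp [hb, hg]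

lemma depthF_le (G : List (Int × List Int)) (Sv : List Int) :
    ∀ (k : Nat) (u : Int), depthF G Sv k u ≤ k := by
  intro k
  induction k with
  | zero => intro u; simp [depthF]
  | succ k ih =>
    intro u
    show ((gget G u).getD []).foldl _ 0 ≤ k + 1
    have H : ∀ (l : List Int) (acc : Nat), acc ≤ k + 1 →
        l.foldl (fun m v => if v ∈ Sv then m else max m (depthF G Sv k v + 1)) acc ≤ k + 1 := by
      intro l
      induction l with
      | nil => intro acc h; simpa
      | cons v l ihl =>
        intro acc h
        simp only [List.foldl]
        apply ihl
        split
        · exact h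
        · exact max_le h (by have := ih v; omega)
    exact H _ 0 (by omega)

lemma iterR_le (G : List (Int × List Int)) (Sv : List Int) (s : Int) :
    ∀ {j N : Nat}, j ≤ N → ∀ {x : Int}, x ∈ iterR G Sv s j → x ∈ iterR G Sv s N := by
  intro j N h
  induction N with
  | zero =>
    intro x hx
    have hj : j = 0 := by omega
    subst hj
    exact hx
  | succ N ih =>
    intro x hx
    rcases Nat.lt_or_ge j (N + 1) with h1 | h1
    · simp only [iterR, stepR]
      exact List.mem_append_left _ (ih (by omega) hx)
    · have hj : j = N + 1 := by omega
      subst hj; exact hx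

lemma iterR_child (G : List (Int × List Int)) (Sv : List Int) (s : Int) {j : Nat} {u : Int}
    (hu : u ∈ iterR G Sv s j) {ns : List Int} (hns : gget G u = some ns)
    {v : Int} (hv : v ∈ ns) (hb : v ∉ Sv) : v ∈ iterR G Sv s (j + 1) := by
  simp only [iterR, stepR]
  refine List.mem_append_right _ (List.mem_flatMap.2 ⟨u, hu, ?_⟩)
  rw [hns]
  exact List.mem_filter.2 ⟨hv, by simpa using hb⟩

lemma foldl_ge {α : Type} (f : Int → α → Int) (h : ∀ (a : Int) (x : α), a ≤ f a x) :
    ∀ (l : List α) (a : Int), a ≤ l.foldl f a := by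
  intro l
  induction l with
  | nil => intro a; simp
  | cons x l ih => intro a; exact le_trans (h a x) (ih (f a x))

lemma dfsF_ge (G : List (Int × List Int)) (Sv : List Int) :
    ∀ (fuel : Nat) (u : Int) (t : Int), t ≤ dfsF G Sv fuel u t := by
  intro fuel
  induction fuel with
  | zero => intro u t; simp [dfsF]
  | succ fuel ih =>
    intro u t
    cases hns : gget G u with
    | none => simp [dfsF, hns]
    | some ns =>
      simp only [dfsF, hns]
      have := foldl_ge (fun t v => if v ∈ Sv then t else dfsF G Sv fuel v t)
        (by
          intro a x
          dsimp only
          split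
          · exact le_refl a
          · exact ih x a) ns t
      omega

lemma cnt_pos (G : List (Int × List Int)) (Sv : List Int) {u : Int} {ns : List Int}
    (hns : gget G u = some ns) : 1 ≤ cntN G Sv u := by
  unfold cntN
  simp only [dfsF, hns]
  have := foldl_ge (fun t v => if v ∈ Sv then t else dfsF G Sv (depthF G Sv (G.length + 2) u) v t)
    (by
      intro a x
      dsimp only
      split
      · exact le_refl a
      · exact dfsF_ge G Sv _ x a) ns 0
  omega

-- the main A-side lemma: with enough fuel, A's recursion from u adds cntN u to t
lemma dfsA_spec (G : List (Int × List Int)) (s : Int) (Sv : List Int)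
    (HP : ∀ u ∈ reachL G Sv s, (gget G u).isSome = true ∧
      ∀ v ∈ (gget G u).getD [], v ∉ Sv →
        depthF G Sv (G.length + 2) v < depthF G Sv (G.length + 2) u) :
    ∀ (k : Nat) (u : Int), depthF G Sv (G.length + 2) u = k →
      ∀ (j : Nat), u ∈ iterR G Sv s j → j + k ≤ G.length + 2 →
      ∀ (fuel : Nat) (t : Int), k < fuel → dfsF G Sv fuel u t = t + cntN G Sv u := by
  intro k
  induction k using Nat.strong_induction_on with
  | _ k IH =>
  intro u hk j hu hj fuel t hfuel
  have hR : u ∈ reachL G Sv s := iterR_le G Sv s (by omega) hu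
  obtain ⟨hsome, HD⟩ := HP u hR
  obtain ⟨ns, hns⟩ : ∃ ns, gget G u = some ns := by
    cases h : gget G u with
    | none => rw [h] at hsome; simp at hsome
    | some ns => exact ⟨ns, rfl⟩
  have hchild : ∀ v ∈ ns, v ∉ Sv →
      v ∈ iterR G Sv s (j + 1) ∧ depthF G Sv (G.length + 2) v < k := by
    intro v hv hvS
    refine ⟨iterR_child G Sv s hu hns hv hvS, ?_⟩
    have := HD v (by rw [hns]; exact hv) hvS
    omega
  have fold_eq : ∀ (fuel' : Nat), k ≤ fuel' →
      ∀ (t0 : Int), ns.foldl (fun t v => if v ∈ Sv then t else dfsF G Sv fuel' v t) t0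
        = t0 + (ns.map (fun v => if v ∈ Sv then 0 else cntN G Sv v)).sum := by
    intro fuel' hf t0
    have hcong : ∀ (acc : Int), ∀ v ∈ ns,
        (if v ∈ Sv then acc else dfsF G Sv fuel' v acc)
          = acc + (if v ∈ Sv then 0 else cntN G Sv v) := by
      intro acc v hv
      by_cases hvS : v ∈ Sv
      · simp [hvS]
      · obtain ⟨hvR, hvk⟩ := hchild v hv hvS
        simp only [if_neg hvS]
        exact IH _ hvk v rfl (j + 1) hvR (by omega) fuel' acc (by omega)
    rw [PySem.List.foldl_congr_mem ns _ _ t0 hcong]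
    exact PySem.List.foldl_add ns _ t0
  obtain ⟨F, rfl⟩ : ∃ F, fuel = F + 1 := ⟨fuel - 1, by omega⟩
  have lhs : dfsF G Sv (F + 1) u t
      = (ns.foldl (fun t v => if v ∈ Sv then t else dfsF G Sv F v t) t) + 1 := by
    simp [dfsF, hns]
  have rhs : cntN G Sv u
      = (ns.foldl (fun t v => if v ∈ Sv then t else dfsF G Sv (depthF G Sv (G.length + 2) u) v t) 0) + 1 := by
    simp [cntN, dfsF, hns]
  rw [lhs, rhs, fold_eq F (by omega) t, fold_eq _ (by rw [hk]) 0]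
  omega

-- A's count satisfies the one-step recurrence
lemma cntN_eq (G : List (Int × List Int)) (s : Int) (Sv : List Int)
    (HP : ∀ u ∈ reachL G Sv s, (gget G u).isSome = true ∧
      ∀ v ∈ (gget G u).getD [], v ∉ Sv →
        depthF G Sv (G.length + 2) v < depthF G Sv (G.length + 2) u)
    {u : Int} {j : Nat} (hu : u ∈ iterR G Sv s j) (hj : j + depthF G Sv (G.length + 2) u ≤ G.length + 2)
    {ns : List Int} (hns : gget G u = some ns) :
    cntN G Sv u = (ns.map (fun v => if v ∈ Sv then 0 else cntN G Sv v)).sum + 1 := by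
  have hR : u ∈ reachL G Sv s := iterR_le G Sv s (by omega) hu
  obtain ⟨hsome, HD⟩ := HP u hR
  have hcong : ∀ (acc : Int), ∀ v ∈ ns,
      (if v ∈ Sv then acc else dfsF G Sv (depthF G Sv (G.length + 2) u) v acc)
        = acc + (if v ∈ Sv then 0 else cntN G Sv v) := by
    intro acc v hv
    by_cases hvS : v ∈ Sv
    · simp [hvS]
    · have hvR := iterR_child G Sv s hu hns hv hvS
      have hvk := HD v (by rw [hns]; exact hv) hvS
      simp only [if_neg hvS]
      exact dfsA_spec G s Sv HP _ v rfl (j + 1) hvR (by omega) _ acc hvk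
  have h0 : cntN G Sv u
      = (ns.foldl (fun t v => if v ∈ Sv then t else dfsF G Sv (depthF G Sv (G.length + 2) u) v t) 0) + 1 := by
    simp [cntN, dfsF, hns]
  rw [h0, PySem.List.foldl_congr_mem ns _ _ 0 hcong, PySem.List.foldl_add ns _ 0]
  omega

lemma ns_len_le (G : List (Int × List Int)) {u : Int} {ns : List Int}
    (hns : gget G u = some ns) : ns.length ≤ (G.flatMap Prod.snd).length := by
  have hmem : (u, ns) ∈ G := PySem.Dict.mem_items_of_get?_eq_some (PySem.Dict.mk G) hns
  rw [List.length_flatMap]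
  exact List.single_le_sum (by simp) _ (List.mem_map.2 ⟨(u, ns), hmem, rfl⟩)

lemma mapsum_le {α : Type} (g : α → Int) (B : Int) :
    ∀ (l : List α), (∀ x ∈ l, g x ≤ B) → (l.map g).sum ≤ l.length * B := by
  intro l
  induction l with
  | nil => intro _; simp
  | cons x l ih =>
    intro h
    have h1 := h x List.mem_cons_self
    have h2 := ih (fun y hy => h y (List.mem_cons_of_mem x hy))
    simp only [List.map, List.sum_cons, List.length_cons]
    have h3 : ((l.length + 1 : Nat) : Int) * B = (l.length : Int) * B + B := by push_cast; ring
    linarith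

-- the call-count is bounded by (E+1)^(rank+1), E = total number of neighbour entries
lemma cnt_le (G : List (Int × List Int)) (s : Int) (Sv : List Int)
    (HP : ∀ u ∈ reachL G Sv s, (gget G u).isSome = true ∧
      ∀ v ∈ (gget G u).getD [], v ∉ Sv →
        depthF G Sv (G.length + 2) v < depthF G Sv (G.length + 2) u) :
    ∀ (k : Nat) (u : Int), depthF G Sv (G.length + 2) u = k →
      ∀ (j : Nat), u ∈ iterR G Sv s j → j + k ≤ G.length + 2 →
      cntN G Sv u ≤ (((G.flatMap Prod.snd).length : Int) + 1) ^ (k + 1) := by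
  intro k
  induction k using Nat.strong_induction_on with
  | _ k IH =>
  intro u hk j hu hj
  have hE0 : (0 : Int) ≤ ((G.flatMap Prod.snd).length : Int) := Int.natCast_nonneg _
  have hpow : (1 : Int) ≤ (((G.flatMap Prod.snd).length : Int) + 1) ^ k :=
    one_le_pow₀ (by omega)
  have hR : u ∈ reachL G Sv s := iterR_le G Sv s (by omega) hu
  obtain ⟨hsome, HD⟩ := HP u hR
  obtain ⟨ns, hns⟩ : ∃ ns, gget G u = some ns := by
    cases h : gget G u with
    | none => rw [h] at hsome; simp at hsome
    | some ns => exact ⟨ns, rfl⟩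
  rw [cntN_eq G s Sv HP hu (by omega) hns]
  have hterm : ∀ v ∈ ns, (if v ∈ Sv then (0 : Int) else cntN G Sv v)
      ≤ (((G.flatMap Prod.snd).length : Int) + 1) ^ k := by
    intro v hv
    by_cases hvS : v ∈ Sv
    · rw [if_pos hvS]; linarith
    · have hvR := iterR_child G Sv s hu hns hv hvS
      have hvk := HD v (by rw [hns]; exact hv) hvS
      rw [if_neg hvS]
      calc cntN G Sv v
          ≤ (((G.flatMap Prod.snd).length : Int) + 1) ^ (depthF G Sv (G.length + 2) v + 1) :=
            IH _ (by omega) v rfl (j + 1) hvR (by omega)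
        _ ≤ (((G.flatMap Prod.snd).length : Int) + 1) ^ k :=
            pow_le_pow_right₀ (by omega) (by omega)
  have hsum := mapsum_le _ _ ns hterm
  have hlen : (ns.length : Int) ≤ ((G.flatMap Prod.snd).length : Int) := by
    exact_mod_cast ns_len_le G hns
  have hmul : (ns.length : Int) * (((G.flatMap Prod.snd).length : Int) + 1) ^ k
      ≤ ((G.flatMap Prod.snd).length : Int) * (((G.flatMap Prod.snd).length : Int) + 1) ^ k :=
    mul_le_mul_of_nonneg_right hlen (by linarith)
  have hring : (((G.flatMap Prod.snd).length : Int) + 1) ^ (k + 1)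
      = ((G.flatMap Prod.snd).length : Int) * (((G.flatMap Prod.snd).length : Int) + 1) ^ k
        + (((G.flatMap Prod.snd).length : Int) + 1) ^ k := by ring
  linarith

lemma sumC_cast (G : List (Int × List Int)) (Sv : List Int) :
    ∀ (l : List Int), (∀ v ∈ l, v ∉ Sv → 1 ≤ cntN G Sv v) →
      (l.map (fun v => if v ∈ Sv then (0 : Int) else cntN G Sv v)).sum = (sumCL G Sv l : Int) := by
  intro l
  induction l with
  | nil => intro _; simp [sumCL]
  | cons v l ih =>
    intro h
    have h2 := ih (fun w hw hwS => h w (List.mem_cons_of_mem v hw) hwS)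
    simp only [sumCL, List.map, List.sum_cons] at h2 ⊢
    rw [Nat.cast_add, ← h2]
    by_cases hvS : v ∈ Sv
    · simp [hvS]
    · rw [if_neg hvS, if_neg hvS]
      have h1 := h v List.mem_cons_self hvS
      rw [Int.toNat_of_nonneg (by omega)]

-- the main B-side lemma: processing frame (u, l) with fuel sumCL l spends exactly
-- that fuel and adds sumCL l + 1 to t
lemma runL (G : List (Int × List Int)) (s : Int) (Sv : List Int)
    (HP : ∀ u ∈ reachL G Sv s, (gget G u).isSome = true ∧
      ∀ v ∈ (gget G u).getD [], v ∉ Sv →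
        depthF G Sv (G.length + 2) v < depthF G Sv (G.length + 2) u) :
    ∀ (k : Nat) (u : Int), depthF G Sv (G.length + 2) u = k →
      ∀ (j : Nat), u ∈ iterR G Sv s j → j + k ≤ G.length + 2 →
      ∀ (l : List Int), (∀ v ∈ l, v ∈ (gget G u).getD []) →
      ∀ (fuel : Nat) (fs : List (Int × List Int)) (t : Int),
        runM G Sv (sumCL G Sv l + fuel) ((u, l) :: fs) t
          = runM G Sv fuel fs (t + (sumCL G Sv l : Int) + 1) := by
  intro k
  induction k using Nat.strong_induction_on with
  | _ k IH =>
  intro u hk j hu hj l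
  induction l with
  | nil =>
    intro _ fuel fs t
    simp only [sumCL, List.map_nil, List.sum_nil, Nat.zero_add]
    rw [runM_pop]
    norm_num
  | cons v rest ihl =>
    intro hl fuel fs t
    have hrest := ihl (fun w hw => hl w (List.mem_cons_of_mem v hw))
    by_cases hvS : v ∈ Sv
    · have hs : sumCL G Sv (v :: rest) = sumCL G Sv rest := by simp [sumCL, hvS]
      rw [hs, runM_skip _ _ _ _ _ _ _ _ hvS, hrest]
    · have hR : u ∈ reachL G Sv s := iterR_le G Sv s (by omega) hu
      obtain ⟨hsome, HD⟩ := HP u hR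
      obtain ⟨ns, hns⟩ : ∃ ns, gget G u = some ns := by
        cases h : gget G u with
        | none => rw [h] at hsome; simp at hsome
        | some ns => exact ⟨ns, rfl⟩
      have hvns : v ∈ ns := by
        have := hl v List.mem_cons_self
        rwa [hns, Option.getD_some] at this
      have hvR : v ∈ iterR G Sv s (j + 1) := iterR_child G Sv s hu hns hvns hvS
      have hvk : depthF G Sv (G.length + 2) v < k := by
        have := HD v (by rw [hns]; exact hvns) hvS
        omega
      have hvsome : (gget G v).isSome = true :=
        (HP v (iterR_le G Sv s (by omega) hvR)).1
      obtain ⟨cs, hcs⟩ : ∃ cs, gget G v = some cs := by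
        cases h : gget G v with
        | none => rw [h] at hvsome; simp at hvsome
        | some cs => exact ⟨cs, rfl⟩
      have HDv := (HP v (iterR_le G Sv s (by omega) hvR)).2
      have hposcs : ∀ w ∈ cs, w ∉ Sv → 1 ≤ cntN G Sv w := by
        intro w hw hwS
        have hwR := iterR_child G Sv s hvR hcs hw hwS
        have hwk := HDv w (by rw [hcs]; exact hw) hwS
        have hwsome := (HP w (iterR_le G Sv s (by omega) hwR)).1
        obtain ⟨ws, hws⟩ : ∃ ws, gget G w = some ws := by
          cases h : gget G w with
          | none => rw [h] at hwsome; simp at hwsome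
          | some ws => exact ⟨ws, rfl⟩
        exact cnt_pos G Sv hws
      have hcnt_v_eq := cntN_eq G s Sv HP hvR (by omega) hcs
      have hv1 : cntN G Sv v = (sumCL G Sv cs : Int) + 1 := by
        rw [hcnt_v_eq, sumC_cast G Sv cs hposcs]
      have hvtoNat : (cntN G Sv v).toNat = sumCL G Sv cs + 1 := by omega
      have hsum : sumCL G Sv (v :: rest) = (sumCL G Sv cs + 1) + sumCL G Sv rest := by
        simp [sumCL, hvS, hvtoNat]
      rw [hsum]
      have harr : (sumCL G Sv cs + 1) + sumCL G Sv rest + fuel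
          = (sumCL G Sv cs + (sumCL G Sv rest + fuel)) + 1 := by omega
      rw [harr, runM_push _ _ _ _ _ _ _ _ _ hvS hcs]
      rw [IH _ hvk v rfl (j + 1) hvR (by omega) cs (by simp [hcs]) (sumCL G Sv rest + fuel)
        ((u, rest) :: fs) t]
      rw [hrest]
      congr 1
      push_cast
      ring

-- both versions compute t0 plus the same count
lemma core_eq (G : List (Int × List Int)) (s : Int) (Sv : List Int)
    (HP : ∀ u ∈ reachL G Sv s, (gget G u).isSome = true ∧
      ∀ v ∈ (gget G u).getD [], v ∉ Sv →
        depthF G Sv (G.length + 2) v < depthF G Sv (G.length + 2) u)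
    {ns : List Int} (hns : gget G s = some ns) (t0 : Int) :
    dfsF G Sv (G.length + 3) s t0
      = runM G Sv (((G.flatMap Prod.snd).length + 1) ^ (G.length + 3)) [(s, ns)] t0 := by
  have hs0 : s ∈ iterR G Sv s 0 := by simp [iterR]
  have hrank := depthF_le G Sv (G.length + 2) s
  have hpos : ∀ w ∈ ns, w ∉ Sv → 1 ≤ cntN G Sv w := by
    intro w hw hwS
    have hwR := iterR_child G Sv s hs0 hns hw hwS
    have hwsome := (HP w (iterR_le G Sv s (by omega) hwR)).1
    obtain ⟨ws, hws⟩ : ∃ ws, gget G w = some ws := by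
      cases h : gget G w with
      | none => rw [h] at hwsome; simp at hwsome
      | some ws => exact ⟨ws, rfl⟩
    exact cnt_pos G Sv hws
  have hv1 : cntN G Sv s = (sumCL G Sv ns : Int) + 1 := by
    rw [cntN_eq G s Sv HP hs0 (by omega) hns, sumC_cast G Sv ns hpos]
  have hbig : sumCL G Sv ns ≤ ((G.flatMap Prod.snd).length + 1) ^ (G.length + 3) := by
    have h1 := cnt_le G s Sv HP _ s rfl 0 hs0 (by omega)
    have h2 : (((G.flatMap Prod.snd).length : Int) + 1) ^ (depthF G Sv (G.length + 2) s + 1)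
        ≤ (((G.flatMap Prod.snd).length : Int) + 1) ^ (G.length + 3) :=
      pow_le_pow_right₀ (by have := Int.natCast_nonneg (G.flatMap Prod.snd).length; omega)
        (by omega)
    have h3 : (((G.flatMap Prod.snd).length : Int) + 1) ^ (G.length + 3)
        = ((((G.flatMap Prod.snd).length + 1) ^ (G.length + 3) : Nat) : Int) := by
      push_cast; ring
    omega
  have hA := dfsA_spec G s Sv HP _ s rfl 0 hs0 (by omega) (G.length + 3) t0 (by omega)
  have hsplit : ((G.flatMap Prod.snd).length + 1) ^ (G.length + 3)
      = sumCL G Sv ns + (((G.flatMap Prod.snd).length + 1) ^ (G.length + 3) - sumCL G Sv ns) := by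
    omega
  rw [hA, hsplit, runL G s Sv HP _ s rfl 0 hs0 (by omega) ns (by simp [hns]) _ [] t0, runM_nil,
    hv1]
  ring

-- ===== VERDICT (by name: the statement is the Claim_ definition above) =====
theorem dfs_spec : Claim_equal_dfs := by
  intro G s d f S t _ hPre
  unfold Spec_dfs
  have HP : ∀ u ∈ reachL G (avoidOf s S) s, (gget G u).isSome = true ∧
      ∀ v ∈ (gget G u).getD [], v ∉ avoidOf s S →
        depthF G (avoidOf s S) (G.length + 2) v < depthF G (avoidOf s S) (G.length + 2) u := hPre
  have hs0 : s ∈ iterR G (avoidOf s S) s 0 := by simp [iterR]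
  have hsome := (HP s (iterR_le G (avoidOf s S) s (Nat.zero_le _) hs0)).1
  obtain ⟨ns, hns⟩ : ∃ ns, gget G s = some ns := by
    cases h : gget G s with
    | none => rw [h] at hsome; simp at hsome
    | some ns => exact ⟨ns, rfl⟩
  cases S with
  | none =>
    simp only [dfs, dfs_alt, hns]
    exact core_eq G s (PySem.Set.add PySem.Set.empty s) HP hns (t + 1)
  | some Sv =>
    simp only [dfs, dfs_alt, hns]
    exact core_eq G s Sv HP hns t
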